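-- pv_equiv track=rewrite | github.com/alexanderk001/nash-equilibrium | src/nash.py | best_response_player2
-- ===== SOURCE A (Python) =====
-- def best_response_player2(matrix):
--     """Find the best responses for Player 2."""
--     best_responses = []
--
--     for row_idx, row in enumerate(matrix):
--         max_payoff = max(cell[1] for cell in row)
--         best_responses.extend(
--             [(row_idx, col_idx) for col_idx, cell in enumerate(row) if cell[1] == max_payoff]
--         )
--     return best_responses
-- ===== SOURCE B (Python) =====
-- def best_response_player2(matrix):
--     """Find the best responses for Player 2 (single pass per row with a running max)."""
--     best_responses = []
--     for row_idx, row in enumerate(matrix):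
--         best = None
--         idxs = []
--         for col_idx, cell in enumerate(row):
--             v = cell[1]
--             if best is None or v > best:
--                 best = v
--                 idxs = [col_idx]
--             elif v == best:
--                 idxs.append(col_idx)
--         best_responses.extend((row_idx, i) for i in idxs)
--     return best_responses
-- ===== Notes on version B (the rewrite author's own statement) =====
-- stated objective: alternative
-- what changed: Each row is scanned once with a running maximum and an index list that is reset on a strictly larger payoff, instead of a max() pass followed by a second comprehension pass over the row.
import Mathlib
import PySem

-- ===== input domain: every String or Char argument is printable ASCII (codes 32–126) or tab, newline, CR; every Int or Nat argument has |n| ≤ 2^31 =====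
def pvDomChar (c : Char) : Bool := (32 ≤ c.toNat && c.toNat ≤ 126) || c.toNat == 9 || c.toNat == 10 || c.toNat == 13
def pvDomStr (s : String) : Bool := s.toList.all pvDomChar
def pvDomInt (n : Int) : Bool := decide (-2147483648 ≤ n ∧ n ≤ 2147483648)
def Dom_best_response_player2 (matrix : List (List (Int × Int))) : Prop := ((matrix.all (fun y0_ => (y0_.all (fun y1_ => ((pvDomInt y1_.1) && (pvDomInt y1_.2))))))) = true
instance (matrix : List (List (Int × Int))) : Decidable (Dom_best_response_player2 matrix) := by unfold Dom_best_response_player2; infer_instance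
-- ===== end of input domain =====

-- B scans each row once with a running maximum (resetting the index list on a strictly larger
-- payoff) instead of A's max()-pass followed by a second collecting pass; same cost, one pass.


-- ===== PORT A =====
def best_response_player2 (matrix : List (List (Int × Int))) : List (Int × Int) :=
  (PySem.List.enumerate matrix).foldl
    (fun best_responses p =>
      match PySem.List.max? (p.2.map Prod.snd) id with
      | none => best_responses   -- Python raises ValueError here; excluded by Pre_
      | some m =>
          best_responses ++
            (PySem.List.enumerate p.2).filterMap
              (fun q => if q.2.2 = m then some (p.1, q.1) else none))
    []

-- ===== PORT B =====
-- per-row single pass: running best payoff and the index list of cells attaining it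
def brRowScan (row : List (Int × Int)) : Option Int × List Int :=
  (PySem.List.enumerate row).foldl
    (fun st q =>
      match st.1 with
      | none => (some q.2.2, [q.1])
      | some b =>
          if b < q.2.2 then (some q.2.2, [q.1])
          else if q.2.2 = b then (st.1, st.2 ++ [q.1])
          else st)
    (none, [])

def best_response_player2_alt (matrix : List (List (Int × Int))) : List (Int × Int) :=
  (PySem.List.enumerate matrix).foldl
    (fun best_responses p => best_responses ++ (brRowScan p.2).2.map (fun i => (p.1, i)))
    []

-- ===== PRECONDITION & SPEC =====
-- Pre_ excludes matrices containing an empty row: there Python A raises ValueError (max() of an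
-- empty sequence) and returns no value.
def Pre_best_response_player2 (matrix : List (List (Int × Int))) : Prop :=
  ∀ row ∈ matrix, row ≠ []
instance (matrix : List (List (Int × Int))) : Decidable (Pre_best_response_player2 matrix) := by unfold Pre_best_response_player2; infer_instance
def pvWitness_best_response_player2 : (List (List (Int × Int))) := [[(0, 1), (2, 1)], [(3, 0)]]

def Spec_best_response_player2 (matrix : List (List (Int × Int))) (out : List (Int × Int)) : Prop := out = best_response_player2_alt matrix
instance (matrix : List (List (Int × Int))) (out : List (Int × Int)) : Decidable (Spec_best_response_player2 matrix out) := by unfold Spec_best_response_player2; infer_instance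

-- ===== CLAIM (what is proved, stated in full; the proofs are below) =====
def Claim_equal_best_response_player2 : Prop := ∀ (matrix : List (List (Int × Int))), Dom_best_response_player2 matrix → Pre_best_response_player2 matrix → Spec_best_response_player2 matrix (best_response_player2 matrix)

-- ===== LEMMAS AND PROOFS =====

-- running maximum, seeded with b (the shape of both ports' best-value updates)
def brMax (b : Int) (l : List Int) : Int :=
  l.foldl (fun a x => if a < x then x else a) b

lemma le_brMax : ∀ (l : List Int) (b : Int), b ≤ brMax b l := by
  intro l
  induction l with
  | nil => intro b; simp [brMax]
  | cons x t ih =>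
      intro b
      have h1 := ih (if b < x then x else b)
      simp only [brMax, List.foldl_cons] at h1 ⊢
      by_cases h : b < x <;> simp only [if_pos, h, if_false] at h1 ⊢ <;> omega

lemma max?_cons : ∀ (t : List Int) (b : Int), PySem.List.max? (b :: t) id = some (brMax b t) := by
  intro t
  induction t with
  | nil => intro b; rfl
  | cons x t ih =>
      intro b
      have h1 := ih (if b < x then x else b)
      simp only [PySem.List.max?, List.foldl_cons, brMax, id] at h1 ⊢
      by_cases h : b < x <;> simp only [h, if_true, if_false] at h1 ⊢ <;> exact h1

-- the invariant of B's per-row scan, over the tail with running best b and collected idxs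
lemma scan_inv : ∀ (row : List (Int × Int)) (k b : Int) (idxs : List Int),
    (PySem.List.enumerate row k).foldl
      (fun st q =>
        match st.1 with
        | none => (some q.2.2, [q.1])
        | some b =>
            if b < q.2.2 then (some q.2.2, [q.1])
            else if q.2.2 = b then (st.1, st.2 ++ [q.1])
            else st)
      (some b, idxs)
    = (some (brMax b (row.map Prod.snd)),
       (if brMax b (row.map Prod.snd) = b then idxs else []) ++
         (PySem.List.enumerate row k).filterMap
           (fun q => if q.2.2 = brMax b (row.map Prod.snd) then some q.1 else none)) := by
  intro row
  induction row with
  | nil => intro k b idxs; simp [PySem.List.enumerate, brMax]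
  | cons c t ih =>
      intro k b idxs
      have hstep : brMax b ((c :: t).map Prod.snd) = brMax (if b < c.2 then c.2 else b) (t.map Prod.snd) := by
        simp [brMax]
      by_cases h1 : b < c.2
      · rw [if_pos h1] at hstep
        rw [hstep]
        have hgt : b < brMax c.2 (t.map Prod.snd) := lt_of_lt_of_le h1 (le_brMax _ _)
        simp only [PySem.List.enumerate, List.foldl_cons, List.filterMap_cons, h1, if_true]
        rw [ih (k + 1) c.2 [k]]
        rw [if_neg (by omega : ¬ brMax c.2 (t.map Prod.snd) = b)]
        by_cases h2 : c.2 = brMax c.2 (t.map Prod.snd)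
        · simp [← h2]
        · simp [h2, Ne.symm h2]
      · rw [if_neg h1] at hstep
        rw [hstep]
        have hge : b ≤ brMax b (t.map Prod.snd) := le_brMax _ _
        by_cases h2 : c.2 = b
        · simp only [PySem.List.enumerate, List.foldl_cons, List.filterMap_cons, h2]
          rw [if_neg (lt_irrefl b)]
          rw [if_pos trivial]
          rw [ih (k + 1) b (idxs ++ [k])]
          by_cases h3 : brMax b (t.map Prod.snd) = b
          · simp [h3, List.append_assoc]
          · rw [if_neg h3, if_neg (show ¬ b = brMax b (List.map Prod.snd t) from fun hh => h3 hh.symm)]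
            simp [h3]
        · have hlt : c.2 < b := by omega
          simp only [PySem.List.enumerate, List.foldl_cons, List.filterMap_cons, h1, h2, if_false]
          rw [ih (k + 1) b idxs]
          rw [if_neg (show ¬ c.2 = brMax b (List.map Prod.snd t) by omega)]

-- per nonempty row, B's scan collects exactly the indices A's second pass collects
lemma row_eq (row : List (Int × Int)) (hrow : row ≠ []) (ri : Int) :
    (match PySem.List.max? (row.map Prod.snd) id with
     | none => ([] : List (Int × Int))
     | some m =>
         (PySem.List.enumerate row).filterMap
           (fun q => if q.2.2 = m then some (ri, q.1) else none))
    = (brRowScan row).2.map (fun i => (ri, i)) := by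
  cases row with
  | nil => exact absurd rfl hrow
  | cons c t =>
      rw [List.map_cons, max?_cons]
      have hscan : brRowScan (c :: t)
          = (some (brMax c.2 (t.map Prod.snd)),
             (if brMax c.2 (t.map Prod.snd) = c.2 then [0] else []) ++
               (PySem.List.enumerate t 1).filterMap
                 (fun q => if q.2.2 = brMax c.2 (t.map Prod.snd) then some q.1 else none)) := by
        show (PySem.List.enumerate (c :: t) 0).foldl _ (none, []) = _
        simp only [PySem.List.enumerate, List.foldl_cons]
        exact scan_inv t 1 c.2 [0]
      rw [hscan]
      simp only [PySem.List.enumerate, List.filterMap_cons, List.map_append, List.map_filterMap]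
      by_cases h : c.2 = brMax c.2 (t.map Prod.snd)
      · simp [← h]
      · simp [h, Ne.symm h]

lemma main_inv : ∀ (matrix : List (List (Int × Int))) (k : Int) (acc : List (Int × Int)),
    (∀ row ∈ matrix, row ≠ []) →
    (PySem.List.enumerate matrix k).foldl
      (fun best_responses p =>
        match PySem.List.max? (p.2.map Prod.snd) id with
        | none => best_responses
        | some m =>
            best_responses ++
              (PySem.List.enumerate p.2).filterMap
                (fun q => if q.2.2 = m then some (p.1, q.1) else none))
      acc
    = (PySem.List.enumerate matrix k).foldl
        (fun best_responses p => best_responses ++ (brRowScan p.2).2.map (fun i => (p.1, i)))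
        acc := by
  intro matrix
  induction matrix with
  | nil => intro k acc _; simp [PySem.List.enumerate]
  | cons r t ih =>
      intro k acc h
      have hr : r ≠ [] := h r (by simp)
      simp only [PySem.List.enumerate, List.foldl_cons]
      rw [ih (k + 1) _ (fun row hrow => h row (by simp [hrow]))]
      congr 1
      have hre := row_eq r hr k
      cases hm : PySem.List.max? (r.map Prod.snd) id with
      | none => rw [hm] at hre; simp at hre; simp [← hre]
      | some m => rw [hm] at hre; simpa using hre

-- ===== VERDICT (by name: the statement is the Claim_ definition above) =====
theorem best_response_player2_spec : Claim_equal_best_response_player2 := by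
  intro matrix _ hpre
  show best_response_player2 matrix = best_response_player2_alt matrix
  exact main_inv matrix 0 [] hpre
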